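-- pv_equiv track=rewrite | github.com/bjarkemoensted/adventofcode | aoc/aoc_2016/solution07.py | ip_iterator
-- ===== SOURCE A (Python) =====
-- def ip_iterator(ip_string):
--     """Takes a string representing an IP address. Yields tuples of inds and whether the ind is inside brackets."""
--     inside_brackets = False
--     for ind, char in enumerate(ip_string):
--         if char == "[":
--             inside_brackets = True
--             continue
--         elif char == "]":
--             inside_brackets = False
--             continue
--         yield ind, inside_brackets
-- ===== SOURCE B (Python) =====
-- def ip_iterator(ip_string):
--     """Takes a string representing an IP address. Yields tuples of inds and whether the ind is inside brackets."""
--     # tokenize: bracket chars become their own tokens, separated by (possibly empty) text chunks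
--     tokens = []
--     cur = []
--     for c in ip_string:
--         if c == "[" or c == "]":
--             tokens.append("".join(cur))
--             tokens.append(c)
--             cur = []
--         else:
--             cur.append(c)
--     tokens.append("".join(cur))
--     # segment-level pass with a running absolute offset
--     offset = 0
--     inside = False
--     for tok in tokens:
--         if tok == "[":
--             inside = True
--             offset += 1
--         elif tok == "]":
--             inside = False
--             offset += 1
--         else:
--             for j, _ch in enumerate(tok):
--                 yield (offset + j, inside)
--             offset += len(tok)
-- ===== Notes on version B (the rewrite author's own statement) =====
-- stated objective: alternative
-- what changed: B first splits the string into bracket tokens and text chunks, then emits indices per chunk with a running offset, instead of A's single flat per-character scan with an inline bracket flag.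
import Mathlib
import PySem

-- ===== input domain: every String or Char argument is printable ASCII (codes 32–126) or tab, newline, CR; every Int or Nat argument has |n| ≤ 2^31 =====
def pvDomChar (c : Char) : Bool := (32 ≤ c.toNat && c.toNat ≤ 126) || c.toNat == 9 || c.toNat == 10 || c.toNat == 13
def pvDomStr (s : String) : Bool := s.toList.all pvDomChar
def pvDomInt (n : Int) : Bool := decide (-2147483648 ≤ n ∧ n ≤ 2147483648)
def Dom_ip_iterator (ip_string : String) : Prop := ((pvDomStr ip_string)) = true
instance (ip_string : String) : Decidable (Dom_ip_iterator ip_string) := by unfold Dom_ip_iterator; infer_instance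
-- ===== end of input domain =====

-- B tokenizes the string into bracket tokens and text chunks, then emits per chunk with a
-- running offset, instead of A's flat per-character scan; same cost, different decomposition.

-- ===== PORT A =====
-- A's flat scan: index counter (Python's enumerate), inline inside_brackets flag, yield = cons.
def ipA_loop : List Char → Int → Bool → List (Int × Bool)
  | [], _, _ => []
  | c :: rest, i, inside =>
    if c = '[' then ipA_loop rest (i + 1) true
    else if c = ']' then ipA_loop rest (i + 1) false
    else (i, inside) :: ipA_loop rest (i + 1) inside

def ip_iterator (ip_string : String) : List (Int × Bool) :=
  ipA_loop ip_string.toList 0 false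

-- ===== PORT B =====
-- B's tokenizer: brackets become singleton tokens, text chunks (possibly empty) between them.
def ipB_tokenize : List Char → List Char → List (List Char)
  | [], cur => [cur.reverse]
  | c :: rest, cur =>
    if c = '[' then cur.reverse :: ['['] :: ipB_tokenize rest []
    else if c = ']' then cur.reverse :: [']'] :: ipB_tokenize rest []
    else ipB_tokenize rest (c :: cur)

-- B's inner chunk loop: for j, _ch in enumerate(tok): yield (offset + j, inside)
def ipB_emitChunk : List Char → Int → Bool → List (Int × Bool)
  | [], _, _ => []
  | _ :: rest, off, inside => (off, inside) :: ipB_emitChunk rest (off + 1) inside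

-- B's segment-level pass with running offset and inside flag.
def ipB_loop : List (List Char) → Int → Bool → List (Int × Bool)
  | [], _, _ => []
  | tok :: rest, off, inside =>
    if tok = ['['] then ipB_loop rest (off + 1) true
    else if tok = [']'] then ipB_loop rest (off + 1) false
    else ipB_emitChunk tok off inside ++ ipB_loop rest (off + (tok.length : Int)) inside

def ip_iterator_alt (ip_string : String) : List (Int × Bool) :=
  ipB_loop (ipB_tokenize ip_string.toList []) 0 false

-- ===== PRECONDITION & SPEC =====
def Spec_ip_iterator (ip_string : String) (out : List (Int × Bool)) : Prop := out = ip_iterator_alt ip_string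
instance (ip_string : String) (out : List (Int × Bool)) : Decidable (Spec_ip_iterator ip_string out) := by unfold Spec_ip_iterator; infer_instance

-- ===== CLAIM (what is proved, stated in full; the proofs are below) =====
def Claim_equal_ip_iterator : Prop := ∀ (ip_string : String), Dom_ip_iterator ip_string → Spec_ip_iterator ip_string (ip_iterator ip_string)

-- ===== LEMMAS AND PROOFS =====

lemma emitChunk_snoc (xs : List Char) (c : Char) (n : Int) (b : Bool) :
    ipB_emitChunk (xs ++ [c]) n b = ipB_emitChunk xs n b ++ [(n + (xs.length : Int), b)] := by
  induction xs generalizing n with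
  | nil => simp [ipB_emitChunk]
  | cons x xs ih =>
      simp [ipB_emitChunk, ih, List.length_cons]
      ring_nf

lemma reverse_ne_singleton (cur : List Char) (c : Char) (h : c ∉ cur) :
    cur.reverse ≠ [c] := by
  intro he
  have : cur = [c] := by
    have := congrArg List.reverse he
    simpa using this
  exact h (by simp [this])

lemma ipB_key (l : List Char) : ∀ (cur : List Char) (n : Int) (b : Bool),
    '[' ∉ cur → ']' ∉ cur →
    ipB_loop (ipB_tokenize l cur) n b
      = ipB_emitChunk cur.reverse n b ++ ipA_loop l (n + (cur.length : Int)) b := by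
  induction l with
  | nil =>
      intro cur n b h1 h2
      simp [ipB_tokenize, ipB_loop, ipA_loop,
        reverse_ne_singleton cur '[' h1, reverse_ne_singleton cur ']' h2]
  | cons c rest ih =>
      have ih0 : ∀ (n : Int) (b : Bool),
          ipB_loop (ipB_tokenize rest []) n b = ipA_loop rest n b := by
        intro n b
        simpa [ipB_emitChunk] using ih [] n b (by simp) (by simp)
      intro cur n b h1 h2
      by_cases hc1 : c = '['
      · subst hc1
        simp [ipB_tokenize, ipB_loop, ipA_loop, ih0,
          reverse_ne_singleton cur '[' h1, reverse_ne_singleton cur ']' h2,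
          add_assoc, add_comm, add_left_comm]
      · by_cases hc2 : c = ']'
        · subst hc2
          simp [ipB_tokenize, ipB_loop, ipA_loop, ih0, hc1,
            reverse_ne_singleton cur '[' h1, reverse_ne_singleton cur ']' h2,
            add_assoc, add_comm, add_left_comm]
        · have h1' : '[' ∉ c :: cur := by
            intro hm
            rcases List.mem_cons.mp hm with hm | hm
            · exact hc1 hm.symm
            · exact h1 hm
          have h2' : ']' ∉ c :: cur := by
            intro hm
            rcases List.mem_cons.mp hm with hm | hm
            · exact hc2 hm.symm
            · exact h2 hm
          simp only [ipB_tokenize, if_neg hc1, if_neg hc2]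
          rw [ih (c :: cur) n b h1' h2']
          simp only [List.reverse_cons, emitChunk_snoc, List.length_reverse,
            ipA_loop, if_neg hc1, if_neg hc2, List.length_cons]
          rw [List.append_assoc]
          simp [add_assoc, add_comm, add_left_comm]

-- ===== VERDICT (by name: the statement is the Claim_ definition above) =====
theorem ip_iterator_spec : Claim_equal_ip_iterator := by
  intro s _
  unfold Spec_ip_iterator ip_iterator ip_iterator_alt
  rw [ipB_key s.toList [] 0 false (by simp) (by simp)]
  simp [ipB_emitChunk]
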